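-- pv_equiv track=rewrite | github.com/jebreimo/SublimeCppMacros | cppimplmaker.py | extractTemplateSpec
-- ===== SOURCE A (Python) =====
-- def appendIfNonEmpty(l, s):
--     if s:
--         l.append(s)
--
-- def isIdentifier(c):
--     return c.isalnum() or c == "_"
--
-- def findWord(s, w):
--     start = s.find(w)
--     while start != -1:
--         end = start + len(w)
--         front = "" if start == 0 else s[start - 1]
--         back = "" if end == len(s) else s[end]
--         if not isIdentifier(front) and not isIdentifier(back):
--             return start
--         start = s.find(w, end)
--     return -1
--
-- def findEndOfTemplate(line, openParens=0):
--     prevPos = 0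
--     while True:
--         pos = line.find(">", prevPos)
--         if pos == -1:
--             return -1, openParens + line[prevPos:].count("<")
--         openParens += line[prevPos:pos].count("<") - 1
--         if openParens == 0:
--             return pos + 1, 0
--         prevPos = pos + 1
--
-- def extractTemplateSpec(lines):
--     if not lines or not findWord(lines[0], "template") == 0:
--         return [], lines
--     tpl = []
--     prefix = []
--     openParens = 0
--     for i, line in enumerate(lines):
--         pos, openParens = findEndOfTemplate(line, openParens)
--         if pos != -1:
--             tpl.extend(lines[:i])
--             appendIfNonEmpty(tpl, line[:pos])
--             appendIfNonEmpty(prefix, line[pos:])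
--             prefix.extend(lines[i + 1:])
--             break
--     return tpl, prefix
-- ===== SOURCE B (Python) =====
-- def extractTemplateSpec(lines):
--     if not lines:
--         return [], lines
--     first = lines[0]
--     if not (first.startswith("template")
--             and (len(first) == 8
--                  or not (first[8].isalnum() or first[8] == "_"))):
--         return [], lines
--     depth = 0
--     for i, line in enumerate(lines):
--         for col, c in enumerate(line):
--             if c == "<":
--                 depth += 1
--             elif c == ">":
--                 depth -= 1
--                 if depth == 0:
--                     pos = col + 1
--                     tpl = lines[:i]
--                     if line[:pos]:
--                         tpl.append(line[:pos])
--                     prefix = [line[pos:]] if line[pos:] else []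
--                     prefix.extend(lines[i + 1:])
--                     return tpl, prefix
--     return [], []
-- ===== Notes on version B (the rewrite author's own statement) =====
-- stated objective: simpler
-- what changed: B replaces A's per-line find('>')/count('<') loop machinery (findEndOfTemplate with cross-line open-paren carry, plus the findWord word-boundary search for the guard) by one flat character scan over the lines that maintains a single depth counter and stops at the '>' that brings it to zero, with a direct startswith/next-char check as the guard.
import Mathlib
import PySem

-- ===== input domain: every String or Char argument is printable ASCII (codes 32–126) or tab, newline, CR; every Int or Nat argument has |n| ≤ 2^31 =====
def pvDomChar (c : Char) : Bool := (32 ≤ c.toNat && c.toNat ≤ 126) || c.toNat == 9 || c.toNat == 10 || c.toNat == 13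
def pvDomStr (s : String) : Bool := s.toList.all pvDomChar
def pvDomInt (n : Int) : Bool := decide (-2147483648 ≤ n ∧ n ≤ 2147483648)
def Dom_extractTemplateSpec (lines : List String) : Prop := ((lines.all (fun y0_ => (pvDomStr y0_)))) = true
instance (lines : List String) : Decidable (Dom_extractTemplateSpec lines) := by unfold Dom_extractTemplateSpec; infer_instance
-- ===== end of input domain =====

-- B replaces A's find/count line-by-line machinery with a single character scan keeping one
-- depth counter (objective: simpler); return values are proved identical on every input.

-- ===== PORT A =====
-- helper: Python's `c.isalnum() or c == "_"` applied to a string that is "" or one character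
def isIdentifierL (s : List Char) : Bool := PySem.Chars.strIsalnum s || s == ['_']

-- findWord's `while start != -1` loop; fuel bounds the iteration count (each iteration moves
-- `start` forward by at least len(w) for the nonempty word A passes, so fuel is never exhausted)
def findWordGo (s w : List Char) : Nat → Int → Int
  | 0, _ => -1
  | fuel+1, start =>
    if start = -1 then -1
    else
      let e : Int := start + w.length
      let front : List Char := if start = 0 then [] else (PySem.List.pyGet? s (start - 1)).elim [] (fun c => [c])
      let back : List Char := if e = (s.length : Int) then [] else (PySem.List.pyGet? s e).elim [] (fun c => [c])
      if !isIdentifierL front && !isIdentifierL back then start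
      else findWordGo s w fuel (PySem.Chars.findFrom s w e)

def findWord (s w : List Char) : Int := findWordGo s w (s.length + 2) (PySem.Chars.find s w)

-- termination fact for findEndGo, cited in its decreasing_by
theorem find_toNat_lt_length (cs sub : List Char) (h : PySem.Chars.find cs sub ≠ -1) (hs : sub ≠ []) :
    (PySem.Chars.find cs sub).toNat < cs.length := by
  have h0 : PySem.Chars.findFrom cs sub 0 ≠ -1 := by rwa [PySem.Chars.findFrom_zero]
  have hsp := (PySem.Chars.findFrom_natCast_spec cs sub 0 (Nat.zero_le _) (by exact_mod_cast h0)).2.1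
  simp only [Nat.cast_zero, PySem.Chars.findFrom_zero] at hsp
  rcases hsp with ⟨t, ht⟩
  by_contra hlt
  have : List.drop (PySem.Chars.find cs sub).toNat cs = [] := by
    rw [List.drop_eq_nil_iff]; omega
  rw [this] at ht
  exact hs (List.append_eq_nil_iff.mp ht).1

-- findEndOfTemplate's `while True` loop, ported as recursion on the suffix line[prevPos:]
-- with the consumed prefix length carried in `off` (the same find/count values are computed)
def findEndGo (cs : List Char) (op : Int) (off : Nat) : Int × Int :=
  let pos := PySem.Chars.find cs ['>']
  if h : pos = -1 then (-1, op + (PySem.Chars.count cs ['<'] : Int))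
  else
    let p := pos.toNat
    let op' := op + (PySem.Chars.count (cs.take p) ['<'] : Int) - 1
    if op' = 0 then (((off + p + 1 : Nat) : Int), 0)
    else findEndGo (cs.drop (p + 1)) op' (off + p + 1)
termination_by cs.length
decreasing_by
  have := find_toNat_lt_length cs ['>'] h (by simp)
  simp only [List.length_drop]
  omega

def findEndOfTemplate (line : List Char) (openParens : Int) : Int × Int := findEndGo line openParens 0

def appendIfNonEmpty (l : List String) (s : String) : List String :=
  if s.toList ≠ [] then l ++ [s] else l

-- the `for i, line in enumerate(lines)` loop with its break
def extractGoA (all : List String) : List String → Nat → Int → List String × List String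
  | [], _, _ => ([], [])
  | line :: rs, i, op =>
    let r := findEndOfTemplate line.toList op
    if r.1 ≠ -1 then
      (appendIfNonEmpty (PySem.List.slice all none (some (i : Int))) (String.ofList (PySem.List.slice line.toList none (some r.1))),
       appendIfNonEmpty [] (String.ofList (PySem.List.slice line.toList (some r.1) none)) ++ PySem.List.slice all (some ((i : Int) + 1)) none)
    else extractGoA all rs (i + 1) r.2

def extractTemplateSpec (lines : List String) : List String × List String :=
  match lines with
  | [] => ([], lines)
  | l0 :: _ =>
    if ¬ (findWord l0.toList "template".toList = 0) then ([], lines)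
    else extractGoA lines lines 0 0

-- ===== PORT B =====
-- B's inner `for col, c in enumerate(line)` with the running depth counter
def scanLine : List Char → Nat → Int → Option Nat × Int
  | [], _, d => (none, d)
  | c :: cs, col, d =>
    if c = '<' then scanLine cs (col + 1) (d + 1)
    else if c = '>' then
      if d - 1 = 0 then (some (col + 1), 0) else scanLine cs (col + 1) (d - 1)
    else scanLine cs (col + 1) d

-- B's guard: lines[0] starts with "template" and the next character (if any) is no identifier
def guardB (f : List Char) : Bool :=
  PySem.Chars.startswith f "template".toList &&
    (match f[8]? with
     | none => true
     | some c => !(PySem.Chars.isalnum c || c == '_'))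

-- B's outer `for i, line in enumerate(lines)`
def extractGoB (all : List String) : List String → Nat → Int → List String × List String
  | [], _, _ => ([], [])
  | line :: rs, i, d =>
    match scanLine line.toList 0 d with
    | (some pos, _) =>
      let t := line.toList.take pos
      let p := line.toList.drop pos
      (all.take i ++ (if t ≠ [] then [String.ofList t] else []),
       (if p ≠ [] then [String.ofList p] else []) ++ all.drop (i + 1))
    | (none, d') => extractGoB all rs (i + 1) d'

def extractTemplateSpec_alt (lines : List String) : List String × List String :=
  match lines with
  | [] => ([], lines)
  | l0 :: _ =>
    if guardB l0.toList then extractGoB lines lines 0 0 else ([], lines)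

-- ===== PRECONDITION & SPEC =====
def Spec_extractTemplateSpec (lines : List String) (out : List String × List String) : Prop := out = extractTemplateSpec_alt lines
instance (lines : List String) (out : List String × List String) : Decidable (Spec_extractTemplateSpec lines out) := by unfold Spec_extractTemplateSpec; infer_instance

-- ===== CLAIM (what is proved, stated in full; the proofs are below) =====
def Claim_equal_extractTemplateSpec : Prop := ∀ (lines : List String), Dom_extractTemplateSpec lines → Spec_extractTemplateSpec lines (extractTemplateSpec lines)

-- ===== LEMMAS AND PROOFS =====

theorem find_go_ge (sub : List Char) : ∀ (l : List Char) (k : Nat),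
    PySem.Chars.find.go sub l k = -1 ∨ (k : Int) ≤ PySem.Chars.find.go sub l k := by
  intro l
  induction l with
  | nil => intro k; rw [PySem.Chars.find.go]; split <;> simp
  | cons c cs ih =>
    intro k
    rw [PySem.Chars.find.go]
    split
    · simp
    · rcases ih (k+1) with h | h
      · left; exact h
      · right; push_cast at h ⊢; omega

theorem find_ge (sub l : List Char) :
    PySem.Chars.find l sub = -1 ∨ 0 ≤ PySem.Chars.find l sub := by
  have := find_go_ge sub l 0
  simpa [PySem.Chars.find] using this

theorem find_go_shift (sub : List Char) (hs : sub ≠ []) : ∀ (l : List Char) (k : Nat),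
    PySem.Chars.find.go sub l k =
      if PySem.Chars.find l sub = -1 then -1 else PySem.Chars.find l sub + k := by
  intro l
  induction l with
  | nil =>
    intro k
    have he : sub.isEmpty = false := by simpa [List.isEmpty_iff] using hs
    simp [PySem.Chars.find, PySem.Chars.find.go, he]
  | cons c cs ih =>
    intro k
    rw [PySem.Chars.find.go]
    by_cases hp : sub.isPrefixOf (c :: cs)
    · have : PySem.Chars.find (c :: cs) sub = 0 := by
        simp [PySem.Chars.find, PySem.Chars.find.go, hp]
      simp [hp, this]
    · have hfind : PySem.Chars.find (c :: cs) sub = PySem.Chars.find.go sub cs 1 := by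
        rw [PySem.Chars.find, PySem.Chars.find.go]; simp [hp]
      rw [hfind, ih (k+1), ih 1]
      rcases find_ge sub cs with h1 | h1
      · simp [h1, hp]
      · have h1' : ¬ PySem.Chars.find cs sub = -1 := by omega
        have h2 : ¬ (PySem.Chars.find cs sub + (1:Nat) = -1) := by push_cast; omega
        simp only [h1', if_false, h2, hp]
        push_cast; ring

theorem find_nil (sub : List Char) (hs : sub ≠ []) : PySem.Chars.find [] sub = -1 := by
  have he : sub.isEmpty = false := by simpa [List.isEmpty_iff] using hs
  simp [PySem.Chars.find, PySem.Chars.find.go, he]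

theorem find_cons (sub : List Char) (hs : sub ≠ []) (c : Char) (cs : List Char) :
    PySem.Chars.find (c :: cs) sub =
      if sub.isPrefixOf (c :: cs) then 0
      else if PySem.Chars.find cs sub = -1 then -1 else PySem.Chars.find cs sub + 1 := by
  rw [PySem.Chars.find, PySem.Chars.find.go]
  by_cases hp : sub.isPrefixOf (c :: cs)
  · simp [hp]
  · simp only [hp]
    rw [find_go_shift sub hs cs 1]
    norm_num

theorem find_eq_zero_iff (sub : List Char) (hs : sub ≠ []) (l : List Char) :
    PySem.Chars.find l sub = 0 ↔ sub <+: l := by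
  cases l with
  | nil =>
    rw [find_nil sub hs]
    simp only [List.prefix_nil]
    constructor
    · intro h; omega
    · intro h; exact absurd h hs
  | cons c cs =>
    rw [find_cons sub hs]
    constructor
    · intro h
      split_ifs at h with hp h1
      · exact List.isPrefixOf_iff_prefix.mp hp
      · exact absurd h (by rcases find_ge sub cs with h2 | h2 <;> omega)
    · intro h
      simp [List.isPrefixOf_iff_prefix.mpr h]

theorem count_go_singleton (c : Char) : ∀ (l : List Char) (fuel acc : Nat), l.length ≤ fuel →
    PySem.Chars.count.go [c] fuel l acc = acc + l.count c := by
  intro l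
  induction l with
  | nil => intro fuel acc _; cases fuel <;> simp [PySem.Chars.count.go]
  | cons x t ih =>
    intro fuel acc hle
    simp only [List.length_cons] at hle
    cases fuel with
    | zero => omega
    | succ f =>
      rw [PySem.Chars.count.go]
      by_cases hx : c = x
      · have hp : [c].isPrefixOf (x :: t) = true := by simp [List.isPrefixOf, hx]
        have hd : List.drop [c].length (x :: t) = t := by simp
        rw [hp, if_pos rfl, hd, ih f (acc+1) (by omega)]
        simp [hx]
        omega
      · have hp : [c].isPrefixOf (x :: t) = false := by
          simp [List.isPrefixOf]; exact hx
        rw [hp, if_neg (by simp), ih f acc (by omega)]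
        have hxc : (x == c) = false := by
          rw [beq_eq_false_iff_ne]; exact fun h => hx h.symm
        simp [List.count_cons, hxc]

theorem count_singleton (c : Char) (cs : List Char) :
    PySem.Chars.count cs [c] = cs.count c := by
  rw [PySem.Chars.count]
  simp only [List.isEmpty_iff]
  rw [if_neg (by simp)]
  simpa using count_go_singleton c cs cs.length 0 le_rfl

theorem findFrom_lb (s w : List Char) (st : Int) (h : 0 ≤ st) :
    PySem.Chars.findFrom s w st = -1 ∨ st ≤ PySem.Chars.findFrom s w st := by
  rw [PySem.Chars.findFrom]
  simp only []
  rw [if_neg (by omega : ¬ st < 0)]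
  split_ifs with h1 h2
  · left; rfl
  · left; rfl
  · right
    rcases find_ge w (List.drop st.toNat (List.take (Int.toNat _) s)) with h3 | h3
    · exact absurd h3 h2
    · omega

theorem findWordGo_neg (s w : List Char) (fuel : Nat) : findWordGo s w fuel (-1) = -1 := by
  cases fuel <;> simp [findWordGo]

theorem findWordGo_pos (s w : List Char) : ∀ (fuel : Nat) (start : Int), 1 ≤ start →
    findWordGo s w fuel start ≠ 0 := by
  intro fuel
  induction fuel with
  | zero => intro start h; simp [findWordGo]
  | succ f ih =>
    intro start h
    simp only [findWordGo]
    rw [if_neg (by omega : ¬ start = -1)]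
    split_ifs <;>
      first
      | omega
      | (rcases findFrom_lb s w (start + (w.length : Int)) (by omega) with h1 | h1
         · rw [h1]; intro hc; rw [findWordGo_neg] at hc; omega
         · exact ih _ (by omega))

theorem isIdentifierL_single (c : Char) :
    isIdentifierL [c] = (PySem.Chars.isalnum c || c == '_') := by
  simp [isIdentifierL, PySem.Chars.strIsalnum]

theorem findWordGo_succ (s w : List Char) (fuel : Nat) (start : Int) (h : start ≠ -1) :
    findWordGo s w (fuel+1) start =
      if (!isIdentifierL (if start = 0 then [] else (PySem.List.pyGet? s (start - 1)).elim [] fun c => [c]) &&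
          !isIdentifierL (if start + (w.length:Int) = (s.length:Int) then [] else (PySem.List.pyGet? s (start + (w.length:Int))).elim [] fun c => [c])) = true
      then start
      else findWordGo s w fuel (PySem.Chars.findFrom s w (start + (w.length:Int))) := by
  rw [findWordGo, if_neg h]

theorem guard_iff (f : List Char) : findWord f "template".toList = 0 ↔ guardB f = true := by
  have hlit : "template".toList = ['t','e','m','p','l','a','t','e'] := by decide
  have hw : (['t','e','m','p','l','a','t','e'] : List Char) ≠ [] := by decide
  rw [findWord, guardB, hlit]
  by_cases hpre : (['t','e','m','p','l','a','t','e'] : List Char) <+: f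
  · have hfind : PySem.Chars.find f ['t','e','m','p','l','a','t','e'] = 0 :=
      (find_eq_zero_iff _ hw f).mpr hpre
    have hsw : PySem.Chars.startswith f ['t','e','m','p','l','a','t','e'] = true :=
      List.isPrefixOf_iff_prefix.mpr hpre
    have hlen : 8 ≤ f.length := by have := hpre.length_le; simpa using this
    rw [hfind, show f.length + 2 = (f.length+1)+1 from rfl,
        findWordGo_succ f _ _ _ (by omega), hsw]
    rw [if_pos (rfl : (0:Int) = 0)]
    have hwl : ((['t','e','m','p','l','a','t','e'] : List Char).length : Int) = 8 := by decide
    rw [hwl]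
    norm_num
    by_cases h8 : f.length = 8
    · rw [if_pos (by omega : (8:Int) = (f.length : Int))]
      have hnone : f[8]? = none := by rw [List.getElem?_eq_none_iff]; omega
      rw [hnone]
      simp [isIdentifierL, PySem.Chars.strIsalnum]
    · have h8' : 8 < f.length := by omega
      rw [if_neg (by omega : ¬ (8:Int) = (f.length : Int))]
      have hget : PySem.List.pyGet? f (8:Int) = some (f[8]'h8') := by
        rw [show (8:Int) = ((8:Nat):Int) by norm_num, PySem.List.pyGet?_natCast]
        exact List.getElem?_eq_getElem h8'
      have hsome : f[8]? = some (f[8]'h8') := List.getElem?_eq_getElem h8'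
      rw [hget, hsome]
      simp only [Option.elim_some]
      have hX : findWordGo f ['t','e','m','p','l','a','t','e'] (f.length+1)
          (PySem.Chars.findFrom f ['t','e','m','p','l','a','t','e'] 8) ≠ 0 := by
        rcases findFrom_lb f ['t','e','m','p','l','a','t','e'] 8 (by omega) with h1 | h1
        · rw [h1, findWordGo_neg]; omega
        · exact findWordGo_pos f _ _ _ (by omega)
      by_cases hid : (PySem.Chars.isalnum (f[8]'h8') || (f[8]'h8') == '_') = true
      · have hRHS : (!PySem.Chars.isalnum (f[8]'h8') && !((f[8]'h8') == '_')) = false := by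
          rcases Bool.or_eq_true_iff.mp hid with h | h <;> simp [h]
        rw [hRHS]
        simp only [Bool.false_eq_true, iff_false]
        intro hc
        exact hX (hc (fun _ => by rw [isIdentifierL_single]; exact hid))
      · have hid' := Bool.eq_false_iff.mpr hid
        have hRHS : (!PySem.Chars.isalnum (f[8]'h8') && !((f[8]'h8') == '_')) = true := by
          rcases Bool.or_eq_false_iff.mp hid' with ⟨h1, h2⟩
          simp [h1, h2]
        rw [hRHS]
        simp only [iff_true]
        intro hp
        have := hp (by simp [isIdentifierL, PySem.Chars.strIsalnum])
        rw [isIdentifierL_single] at this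
        exact absurd this hid
  · have hsw : PySem.Chars.startswith f ['t','e','m','p','l','a','t','e'] = false := by
      rw [PySem.Chars.startswith]
      exact Bool.eq_false_iff.mpr (fun h => hpre (List.isPrefixOf_iff_prefix.mp h))
    rw [hsw]
    simp only [Bool.false_and, Bool.false_eq_true, iff_false]
    rcases find_ge ['t','e','m','p','l','a','t','e'] f with h1 | h1
    · rw [h1, findWordGo_neg]; omega
    · have hne : PySem.Chars.find f ['t','e','m','p','l','a','t','e'] ≠ 0 := fun hc =>
        hpre ((find_eq_zero_iff _ hw f).mp hc)
      exact findWordGo_pos f _ _ _ (by omega)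

theorem findEndGo_unfold (cs : List Char) (op : Int) (off : Nat) :
    findEndGo cs op off =
      if PySem.Chars.find cs ['>'] = -1 then (-1, op + (PySem.Chars.count cs ['<'] : Int))
      else if op + (PySem.Chars.count (cs.take (PySem.Chars.find cs ['>']).toNat) ['<'] : Int) - 1 = 0
        then (((off + (PySem.Chars.find cs ['>']).toNat + 1 : Nat) : Int), 0)
        else findEndGo (cs.drop ((PySem.Chars.find cs ['>']).toNat + 1))
               (op + (PySem.Chars.count (cs.take (PySem.Chars.find cs ['>']).toNat) ['<'] : Int) - 1)
               (off + (PySem.Chars.find cs ['>']).toNat + 1) := by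
  rw [findEndGo]
  simp only [dite_eq_ite]

theorem findEndGo_nil (op : Int) (off : Nat) : findEndGo [] op off = (-1, op) := by
  rw [findEndGo_unfold]
  rw [if_pos (find_nil ['>'] (by decide))]
  rw [count_singleton]
  simp

theorem findEndGo_gt (cs : List Char) (op : Int) (off : Nat) :
    findEndGo ('>' :: cs) op off =
      (if op - 1 = 0 then (((off + 1 : Nat) : Int), 0) else findEndGo cs (op - 1) (off + 1)) := by
  have hfind : PySem.Chars.find ('>' :: cs) ['>'] = 0 := by
    rw [find_cons ['>'] (by decide),
        if_pos (by simp [List.isPrefixOf] : ['>'].isPrefixOf ('>' :: cs) = true)]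
  rw [findEndGo_unfold, hfind]
  rw [if_neg (by omega)]
  norm_num

theorem findEndGo_step (c : Char) (hc : c ≠ '>') (cs : List Char) (op : Int) (off : Nat) :
    findEndGo (c :: cs) op off = findEndGo cs (op + if c = '<' then 1 else 0) (off + 1) := by
  have hsub : (['>'] : List Char) ≠ [] := by decide
  have hpre : (['>'] : List Char).isPrefixOf (c :: cs) = false := by
    simp [List.isPrefixOf]; exact fun h => hc h.symm
  have hcc : ∀ l : List Char, PySem.Chars.count (c :: l) ['<'] =
      (if c = '<' then 1 else 0) + PySem.Chars.count l ['<'] := by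
    intro l
    rw [count_singleton, count_singleton, List.count_cons]
    by_cases h : c = '<'
    · simp [h]; omega
    · have : (c == '<') = false := by rw [beq_eq_false_iff_ne]; exact h
      simp [h, this]
  have hfc := find_cons ['>'] hsub c cs
  rw [hpre] at hfc
  simp only [Bool.false_eq_true, if_false] at hfc
  rcases find_ge ['>'] cs with h1 | h1
  · rw [h1, if_pos rfl] at hfc
    rw [findEndGo_unfold, hfc, if_pos rfl, findEndGo_unfold, h1, if_pos rfl]
    rw [hcc cs]
    simp only [Prod.mk.injEq, true_and]
    push_cast; ring
  · have h1' : ¬ PySem.Chars.find cs ['>'] = -1 := by omega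
    rw [if_neg h1'] at hfc
    rw [findEndGo_unfold, hfc, if_neg (by omega), findEndGo_unfold cs, if_neg h1']
    have htn : (PySem.Chars.find cs ['>'] + 1).toNat = (PySem.Chars.find cs ['>']).toNat + 1 := by
      omega
    rw [htn, List.take_succ_cons, List.drop_succ_cons, hcc]
    have hcnt : (((if c = '<' then 1 else 0) + PySem.Chars.count (List.take (PySem.Chars.find cs ['>']).toNat cs) ['<'] : Nat) : Int) =
        (if c = '<' then (1:Int) else 0) + (PySem.Chars.count (List.take (PySem.Chars.find cs ['>']).toNat cs) ['<'] : Int) := by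
      by_cases hlt : c = '<' <;> simp [hlt]
    rw [hcnt]
    have hop : op + ((if c = '<' then (1:Int) else 0) + (PySem.Chars.count (List.take (PySem.Chars.find cs ['>']).toNat cs) ['<'] : Int)) - 1 =
        (op + if c = '<' then (1:Int) else 0) + (PySem.Chars.count (List.take (PySem.Chars.find cs ['>']).toNat cs) ['<'] : Int) - 1 := by
      ring
    rw [hop]
    have hoff : off + ((PySem.Chars.find cs ['>']).toNat + 1) + 1 = (off + 1) + (PySem.Chars.find cs ['>']).toNat + 1 := by
      omega
    rw [hoff]

theorem scanLine_step (c : Char) (hc : c ≠ '>') (cs : List Char) (col : Nat) (d : Int) :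
    scanLine (c :: cs) col d = scanLine cs (col + 1) (d + if c = '<' then 1 else 0) := by
  by_cases hlt : c = '<'
  · simp [scanLine, hlt]
  · simp [scanLine, hlt, hc]

theorem bridge (cs : List Char) : ∀ (off : Nat) (op : Int),
    findEndGo cs op off =
      (match scanLine cs off op with
       | (none, d') => (-1, d')
       | (some pos, _) => ((pos : Int), 0)) := by
  induction cs with
  | nil => intro off op; rw [findEndGo_nil]; simp [scanLine]
  | cons c cs ih =>
    intro off op
    by_cases hgt : c = '>'
    · subst hgt
      rw [findEndGo_gt]
      by_cases hz : op - 1 = 0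
      · rw [if_pos hz]
        simp [scanLine, hz]
      · rw [if_neg hz]
        rw [ih (off + 1) (op - 1)]
        simp [scanLine, hz]
    · rw [findEndGo_step c hgt, scanLine_step c hgt, ih]

theorem outer_eq (all : List String) : ∀ (rest : List String) (i : Nat) (d : Int),
    extractGoA all rest i d = extractGoB all rest i d := by
  intro rest
  induction rest with
  | nil => intro i d; rfl
  | cons line rs ih =>
    intro i d
    rw [extractGoA, extractGoB, findEndOfTemplate, bridge line.toList 0 d]
    rcases hscan : scanLine line.toList 0 d with ⟨o, d'⟩
    cases o with
    | none =>
      simp only []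
      rw [if_neg (by simp)]
      exact ih (i + 1) d'
    | some pos =>
      simp only []
      rw [if_pos (by simp)]
      simp only [appendIfNonEmpty]
      rw [PySem.List.slice_to_natCast all i,
          PySem.List.slice_to_natCast line.toList pos,
          PySem.List.slice_from_natCast line.toList pos,
          show ((i : Int) + 1) = ((i + 1 : Nat) : Int) by push_cast; ring,
          PySem.List.slice_from_natCast all (i + 1)]
      simp only [String.toList_ofList]
      split_ifs <;> simp_all

-- ===== VERDICT (by name: the statement is the Claim_ definition above) =====
theorem extractTemplateSpec_spec : Claim_equal_extractTemplateSpec := by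
  intro lines _
  unfold Spec_extractTemplateSpec
  cases lines with
  | nil => rfl
  | cons l0 ls =>
    rw [extractTemplateSpec, extractTemplateSpec_alt]
    by_cases hg : guardB l0.toList = true
    · rw [if_pos hg, if_neg (by simpa using (guard_iff l0.toList).mpr hg)]
      exact outer_eq (l0 :: ls) (l0 :: ls) 0 0
    · have hng : ¬ findWord l0.toList "template".toList = 0 := fun h => hg ((guard_iff _).mp h)
      rw [if_pos hng, if_neg hg]
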